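-- pv_equiv track=rewrite | github.com/PouncySilverkitten/yggdrasil | hermothr/hermothr.py | format_recipients
-- ===== SOURCE A (Python) =====
-- def format_recipients(names):
--     """Produces a nice list of recipients in human-pleasing format"""
--     names_as_string = ""
--     for i in range(len(names)):
--         if i == len(names) - 1 and not len(names) == 1:
--             names_as_string += "& {}".format(names[i])
--         elif i == len(names) - 1:
--             names_as_string += "{}".format(names[i])
--         elif i == len(names) - 2:
--             names_as_string += "{} ".format(names[i])
--         else:
--             names_as_string += "{}, ".format(names[i])
--     return names_as_string
-- ===== SOURCE B (Python) =====
-- def format_recipients(names):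
--     """Produces a nice list of recipients in human-pleasing format"""
--     if not names:
--         return ""
--     if len(names) == 1:
--         return "{}".format(names[0])
--     return ", ".join(names[:-2] + ["{} & {}".format(names[-2], names[-1])])
-- ===== Notes on version B (the rewrite author's own statement) =====
-- stated objective: idiomatic
-- what changed: Replaces the index-based loop with four position-dependent branches by early returns for the empty and singleton cases plus a single ', '.join over names[:-2] with the last two names pre-combined as 'x & y'.
import Mathlib
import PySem

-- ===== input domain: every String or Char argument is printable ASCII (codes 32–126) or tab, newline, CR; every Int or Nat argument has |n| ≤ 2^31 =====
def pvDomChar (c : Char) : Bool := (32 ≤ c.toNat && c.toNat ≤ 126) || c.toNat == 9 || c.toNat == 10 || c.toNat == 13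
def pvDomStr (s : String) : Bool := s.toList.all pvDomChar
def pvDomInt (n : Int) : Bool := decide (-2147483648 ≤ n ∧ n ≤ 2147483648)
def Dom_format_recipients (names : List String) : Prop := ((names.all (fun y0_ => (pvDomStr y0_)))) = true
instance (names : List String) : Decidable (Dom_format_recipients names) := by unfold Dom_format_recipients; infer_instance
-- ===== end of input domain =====

-- B replaces A's index loop with its four position-dependent branches by early returns for
-- the degenerate cases plus a single ", "-join over names[:-2] with the last two names
-- pre-combined as "x & y" (idiomatic decomposition; same cost).


-- ===== PORT A =====
-- A-side helper: the body of A's for-loop (the four branches), verbatim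
def pvStepA (names : List String) (acc : String) (i : Int) : String :=
  if i = PySem.List.len names - 1 ∧ ¬ (PySem.List.len names = 1) then
    acc ++ ("& " ++ PySem.List.pyGetD names i "")
  else if i = PySem.List.len names - 1 then
    acc ++ PySem.List.pyGetD names i ""
  else if i = PySem.List.len names - 2 then
    acc ++ (PySem.List.pyGetD names i "" ++ " ")
  else
    acc ++ (PySem.List.pyGetD names i "" ++ ", ")

def format_recipients (names : List String) : String :=
  (PySem.List.pyRange 0 (PySem.List.len names) 1).foldl (pvStepA names) ""

-- ===== PORT B =====
def format_recipients_alt (names : List String) : String :=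
  if names = [] then ""
  else if names.length = 1 then PySem.List.pyGetD names 0 ""
  else
    PySem.Str.join ", "
      (PySem.List.slice names none (some (-2)) ++
        [PySem.List.pyGetD names (-2) "" ++ " & " ++ PySem.List.pyGetD names (-1) ""])

-- ===== PRECONDITION & SPEC =====
def Spec_format_recipients (names : List String) (out : String) : Prop := out = format_recipients_alt names
instance (names : List String) (out : String) : Decidable (Spec_format_recipients names out) := by unfold Spec_format_recipients; infer_instance

-- ===== CLAIM (what is proved, stated in full; the proofs are below) =====
def Claim_equal_format_recipients : Prop := ∀ (names : List String), Dom_format_recipients names → Spec_format_recipients names (format_recipients names)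

-- ===== LEMMAS AND PROOFS =====

-- comma-concatenation of a block of names, as a list of chars
def pvCommaCat (l : List (List Char)) : List Char := (l.map (· ++ (", ".toList))).flatten

theorem pvCommaCat_nil : pvCommaCat [] = [] := rfl

theorem pvCommaCat_cons (x : List Char) (l : List (List Char)) :
    pvCommaCat (x :: l) = x ++ ", ".toList ++ pvCommaCat l := by
  simp [pvCommaCat]

theorem pvJoin_append_singleton (l : List (List Char)) (x : List Char) :
    PySem.Chars.join ", ".toList (l ++ [x]) = pvCommaCat l ++ x := by
  induction l with
  | nil => simp [pvCommaCat_nil, PySem.Chars.join_singleton]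
  | cons a t ih =>
    cases t with
    | nil =>
      simp [PySem.Chars.join_cons_cons, PySem.Chars.join_singleton, pvCommaCat_cons,
        pvCommaCat_nil]
    | cons b t' =>
      rw [List.cons_append, List.cons_append, PySem.Chars.join_cons_cons,
        ← List.cons_append, ih]
      simp [pvCommaCat_cons]

theorem pvFoldl_comma (l : List String) (acc : String) :
    (l.foldl (fun a s => a ++ (s ++ ", ")) acc).toList
      = acc.toList ++ pvCommaCat (l.map String.toList) := by
  induction l generalizing acc with
  | nil => simp [pvCommaCat_nil]
  | cons a t ih =>
    simp only [List.foldl_cons, ih, List.map_cons, pvCommaCat_cons]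
    simp [String.toList_append]

-- A's loop body on an index strictly before the last two takes the final else-branch
theorem pvStepA_early (names : List String) (acc : String) (i : Int)
    (_h0 : 0 ≤ i) (h : i < (names.length : Int) - 2) :
    pvStepA names acc i = acc ++ (PySem.List.pyGetD names i "" ++ ", ") := by
  have hlen := PySem.List.len_eq names
  unfold pvStepA
  rw [hlen, if_neg (by omega), if_neg (by omega), if_neg (by omega)]

theorem pvStepA_penult (names : List String) (acc : String) (h2 : 2 ≤ names.length) :
    pvStepA names acc ((names.length : Int) - 2)
      = acc ++ (names[names.length - 2]'(by omega) ++ " ") := by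
  have hlen := PySem.List.len_eq names
  have ht : ((names.length : Int) - 2).toNat = names.length - 2 := by omega
  unfold pvStepA
  rw [hlen, if_neg (by omega), if_neg (by omega), if_pos (by omega),
    PySem.List.pyGetD_eq_getElem names "" (by omega) (by omega)]
  simp only [ht]

theorem pvStepA_last (names : List String) (acc : String) (h2 : 2 ≤ names.length) :
    pvStepA names acc ((names.length : Int) - 1)
      = acc ++ ("& " ++ names[names.length - 1]'(by omega)) := by
  have hlen := PySem.List.len_eq names
  have ht : ((names.length : Int) - 1).toNat = names.length - 1 := by omega
  unfold pvStepA
  rw [hlen, if_pos (by omega),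
    PySem.List.pyGetD_eq_getElem names "" (by omega) (by omega)]
  simp only [ht]

theorem pv_main (names : List String) (h2 : 2 ≤ names.length) :
    format_recipients names = format_recipients_alt names := by
  have hne : names ≠ [] := by
    intro h; rw [h] at h2; simp at h2
  have hne1 : ¬ names.length = 1 := by omega
  apply String.toList_injective
  -- reduce B
  have hB : (format_recipients_alt names).toList
      = pvCommaCat ((names.take (names.length - 2)).map String.toList)
        ++ (names[names.length - 2]'(by omega)).toList ++ " & ".toList
        ++ (names[names.length - 1]'(by omega)).toList := by
    rw [format_recipients_alt, if_neg hne, if_neg hne1,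
      PySem.List.slice_to_neg_ofNat names 2 (by omega),
      PySem.List.pyGetD_neg_ofNat names 2 "" (by omega) (by omega),
      PySem.List.pyGetD_neg_ofNat names 1 "" (by omega) (by omega),
      PySem.Str.toList_join, List.map_append, List.map_singleton,
      pvJoin_append_singleton]
    simp [String.toList_append]
  rw [hB]
  -- reduce A: split the range at length - 2
  have htail : PySem.List.pyRange ((names.length : Int) - 2) (names.length : Int) 1
      = [(names.length : Int) - 2, (names.length : Int) - 1] := by
    rw [PySem.List.pyRange_one_cons (by omega),
      show (names.length : Int) - 2 + 1 = (names.length : Int) - 1 by ring,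
      PySem.List.pyRange_one_cons (by omega),
      show (names.length : Int) - 1 + 1 = (names.length : Int) by ring,
      PySem.List.pyRange_one_eq_nil (by omega)]
  have hsplit : PySem.List.pyRange 0 (PySem.List.len names) 1
      = PySem.List.pyRange 0 ((names.length : Int) - 2) 1
        ++ [(names.length : Int) - 2, (names.length : Int) - 1] := by
    rw [PySem.List.len_eq,
      PySem.List.pyRange_one_append 0 ((names.length : Int) - 2) (names.length : Int)
        (by omega) (by omega), htail]
  rw [format_recipients, hsplit, List.foldl_append]
  -- the prefix loop over indices 0 .. length-3
  have hlen_take : PySem.List.len (names.take (names.length - 2))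
      = (names.length : Int) - 2 := by
    simp only [PySem.List.len_eq, List.length_take]
    omega
  have hpre :
      (PySem.List.pyRange 0 ((names.length : Int) - 2) 1).foldl (pvStepA names) ""
      = (names.take (names.length - 2)).foldl (fun a s => a ++ (s ++ ", ")) "" := by
    calc (PySem.List.pyRange 0 ((names.length : Int) - 2) 1).foldl (pvStepA names) ""
        = (PySem.List.pyRange 0 ((names.length : Int) - 2) 1).foldl
            (fun a i => a ++ (PySem.List.pyGetD (names.take (names.length - 2)) i "" ++ ", ")) "" := by
          apply PySem.List.foldl_congr_mem
          intro a i hi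
          rw [PySem.List.mem_pyRange_one] at hi
          rw [pvStepA_early names a i hi.1 hi.2]
          congr 2
          rw [PySem.List.pyGetD_eq_getElem _ _ hi.1 (by omega),
            PySem.List.pyGetD_eq_getElem _ _ hi.1
              (by simp only [List.length_take]; push_cast; omega)]
          rw [List.getElem_take]
      _ = (names.take (names.length - 2)).foldl (fun a s => a ++ (s ++ ", ")) "" := by
          rw [show ((names.length : Int) - 2) = PySem.List.len (names.take (names.length - 2)) from hlen_take.symm]
          exact PySem.List.foldl_pyRange_zero_pyGetD (names.take (names.length - 2)) ""
            (fun a s => a ++ (s ++ ", ")) ""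
  simp only [List.foldl_cons, List.foldl_nil]
  rw [hpre, pvStepA_penult _ _ h2, pvStepA_last _ _ h2]
  simp [String.toList_append, pvFoldl_comma]

theorem pv_all (names : List String) :
    format_recipients names = format_recipients_alt names := by
  match names with
  | [] => rfl
  | [x] =>
    have h1 : PySem.List.pyRange 0 (PySem.List.len [x]) 1 = [0] := by
      rw [show PySem.List.len [x] = (0 : Int) + 1 by simp [PySem.List.len_eq],
        PySem.List.pyRange_one_singleton]
    rw [format_recipients, h1, List.foldl_cons, List.foldl_nil]
    rw [show pvStepA [x] "" 0 = "" ++ PySem.List.pyGetD [x] 0 "" by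
      unfold pvStepA
      rw [if_neg (by simp [PySem.List.len_eq]), if_pos (by simp [PySem.List.len_eq])]]
    rw [format_recipients_alt, if_neg (by simp), if_pos (by simp)]
    simp
  | a :: b :: rest => exact pv_main (a :: b :: rest) (by simp)

-- ===== VERDICT (by name: the statement is the Claim_ definition above) =====
theorem format_recipients_spec : Claim_equal_format_recipients := by
  intro names _
  exact pv_all names
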